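-- pv_equiv track=rewrite | github.com/Kinetics20/Python_practice_sessions_05 | Unit_tests/codewars_functions_.py | next_item
-- ===== SOURCE A (Python) =====
-- def next_item(sequence, item):
--     found = False
--     for i in sequence:
--         if found:
--             return i
--         if i == item:
--             found = True
--     return None
-- ===== SOURCE B (Python) =====
-- def next_item(sequence, item):
--     # staged: locate the first occurrence by position, then index the successor
--     seq = list(sequence)
--     try:
--         i = seq.index(item)
--     except ValueError:
--         return None
--     return seq[i + 1] if i + 1 < len(seq) else None
-- ===== Notes on version B (the rewrite author's own statement) =====
-- stated objective: idiomatic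
-- what changed: Replaces the stateful found-flag scan with two staged operations: list.index locates the first occurrence's position, then the successor is fetched by positional indexing (guarded by the length), with a ValueError meaning no match.
import Mathlib
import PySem

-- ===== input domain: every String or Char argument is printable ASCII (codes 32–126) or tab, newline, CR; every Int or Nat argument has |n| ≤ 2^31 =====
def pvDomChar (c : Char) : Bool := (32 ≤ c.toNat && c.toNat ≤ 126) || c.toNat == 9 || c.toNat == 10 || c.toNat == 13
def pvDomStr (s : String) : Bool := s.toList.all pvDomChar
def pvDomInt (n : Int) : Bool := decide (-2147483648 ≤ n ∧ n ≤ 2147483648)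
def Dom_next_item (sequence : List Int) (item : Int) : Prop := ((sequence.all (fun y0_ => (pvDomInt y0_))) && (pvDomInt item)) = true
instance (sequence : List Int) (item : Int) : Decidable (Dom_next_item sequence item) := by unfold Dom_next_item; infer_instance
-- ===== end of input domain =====

-- B changes the decomposition: stage 1 finds the first occurrence's index, stage 2 fetches the successor by position.

-- ===== PORT A =====
-- found-flag loop, transliterated as structural recursion on the list with the flag as state
def nextItemGo (xs : List Int) (item : Int) (found : Bool) : Option Int :=
  match xs with
  | [] => none
  | i :: rest =>
      if found then some i
      else if i == item then nextItemGo rest item true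
      else nextItemGo rest item found

def next_item (sequence : List Int) (item : Int) : Option Int :=
  nextItemGo sequence item false

-- ===== PORT B =====
-- B: seq.index(item) (ValueError -> None), then seq[i+1] if i+1 < len(seq) else None
def next_item_alt (sequence : List Int) (item : Int) : Option Int :=
  match PySem.List.index? sequence item with
  | none => none
  | some i => if i + 1 < sequence.length then sequence[i + 1]? else none

-- ===== PRECONDITION & SPEC =====
def Spec_next_item (sequence : List Int) (item : Int) (out : Option Int) : Prop := out = next_item_alt sequence item
instance (sequence : List Int) (item : Int) (out : Option Int) : Decidable (Spec_next_item sequence item out) := by unfold Spec_next_item; infer_instance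

-- ===== CLAIM =====
def Claim_equal_next_item : Prop := ∀ (sequence : List Int) (item : Int), Dom_next_item sequence item → Spec_next_item sequence item (next_item sequence item)

-- ===== LEMMAS AND PROOFS =====

-- once the flag is set, A returns the head of the remaining list
theorem go_true_eq (xs : List Int) (item : Int) : nextItemGo xs item true = xs.head? := by
  cases xs <;> simp [nextItemGo]

-- A's flag loop equals B's index-then-lookup
theorem go_false_eq (xs : List Int) (item : Int) :
    nextItemGo xs item false = next_item_alt xs item := by
  induction xs with
  | nil => rfl
  | cons x rest ih =>
      by_cases h : x = item
      · subst h
        rw [next_item_alt, PySem.List.index?_cons_self]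
        simp [nextItemGo, go_true_eq]
        cases rest <;> simp
      · rw [next_item_alt, PySem.List.index?_cons_of_ne rest h]
        rw [nextItemGo, if_neg (by simp), if_neg (by simp [h]), ih, next_item_alt]
        cases hr : PySem.List.index? rest item with
        | none => simp
        | some i =>
            simp only [Option.map_some]
            by_cases hlt : i + 1 < rest.length
            · rw [if_pos hlt, if_pos (by simp; omega)]
              simp
            · rw [if_neg hlt, if_neg (by simp; omega)]

-- ===== VERDICT =====
theorem next_item_spec : Claim_equal_next_item := by
  intro sequence item _
  exact go_false_eq sequence item
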